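-- pv_equiv track=rewrite | github.com/TheSeanLavery/BubbleSockets | simple_server.py | diagonal_pattern
-- ===== SOURCE A (Python) =====
-- def diagonal_pattern(rows, cols):
--     result = []
--
--     # Process all diagonals from top-left to bottom-right
--     for sum_idx in range(rows + cols - 1):
--         diagonal = []
--         for i in range(max(0, sum_idx - cols + 1), min(rows, sum_idx + 1)):
--             j = sum_idx - i
--             if 0 <= j < cols:
--                 diagonal.append(i * cols + j)
--
--         # Alternate direction for even/odd diagonals
--         if sum_idx % 2 == 1:
--             diagonal.reverse()
--
--         result.extend(diagonal)
--
--     return result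
-- ===== SOURCE B (Python) =====
-- def diagonal_pattern(rows, cols):
--     # Scatter: one row-major pass grouping cell indices into buckets by diagonal i+j.
--     buckets = {}
--     for i in range(rows):
--         for j in range(cols):
--             buckets.setdefault(i + j, []).append(i * cols + j)
--     # Gather: walk the diagonals, reversing the odd ones.
--     result = []
--     for s in range(rows + cols - 1):
--         diag = buckets.get(s, [])
--         if s % 2 == 1:
--             diag = list(reversed(diag))
--         result.extend(diag)
--     return result
-- ===== Notes on version B (the rewrite author's own statement) =====
-- stated objective: alternative
-- what changed: A walks each anti-diagonal computing its index range with max/min arithmetic; B instead does one plain row-major sweep scattering cell indices into dict buckets keyed by i+j, then gathers the buckets in diagonal order, reversing the odd ones.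
import Mathlib
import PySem

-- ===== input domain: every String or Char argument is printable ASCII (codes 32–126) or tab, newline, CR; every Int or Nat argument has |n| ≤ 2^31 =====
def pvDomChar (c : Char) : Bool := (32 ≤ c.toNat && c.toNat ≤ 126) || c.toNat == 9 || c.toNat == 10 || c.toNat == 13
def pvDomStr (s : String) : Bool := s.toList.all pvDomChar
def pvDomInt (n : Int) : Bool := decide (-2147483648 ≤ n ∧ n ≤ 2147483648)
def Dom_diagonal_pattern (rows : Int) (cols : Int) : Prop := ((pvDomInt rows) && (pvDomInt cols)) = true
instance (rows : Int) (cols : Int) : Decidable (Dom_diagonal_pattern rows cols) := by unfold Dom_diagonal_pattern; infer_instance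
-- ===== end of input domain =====

-- B replaces A's per-diagonal index arithmetic by a scatter-then-gather grouping pass (a dict of
-- diagonal buckets filled in one row-major sweep, then concatenated with odd diagonals reversed).

-- ===== PORT A =====
def diagonal_pattern (rows : Int) (cols : Int) : List Int :=
  (PySem.List.pyRange 0 (rows + cols - 1) 1).foldl (fun result sum_idx =>
    let diagonal := (PySem.List.pyRange (max 0 (sum_idx - cols + 1)) (min rows (sum_idx + 1)) 1).foldl
      (fun diagonal i =>
        let j := sum_idx - i
        if 0 ≤ j ∧ j < cols then diagonal ++ [i * cols + j] else diagonal) []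
    let diagonal := if PySem.Int.mod sum_idx 2 == 1 then diagonal.reverse else diagonal
    result ++ diagonal) []

-- ===== PORT B =====
def diagonal_pattern_alt (rows : Int) (cols : Int) : List Int :=
  let buckets : PySem.Dict Int (List Int) :=
    (PySem.List.pyRange 0 rows 1).foldl (fun b i =>
      (PySem.List.pyRange 0 cols 1).foldl (fun b j =>
        b.modify (i + j) [] (· ++ [i * cols + j])) b)   -- buckets.setdefault(i+j, []).append(i*cols+j)
      PySem.Dict.empty
  (PySem.List.pyRange 0 (rows + cols - 1) 1).foldl (fun result s =>
    let diag := buckets.getD s []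
    let diag := if PySem.Int.mod s 2 == 1 then diag.reverse else diag
    result ++ diag) []

-- ===== PRECONDITION & SPEC =====
def Spec_diagonal_pattern (rows : Int) (cols : Int) (out : List Int) : Prop := out = diagonal_pattern_alt rows cols
instance (rows : Int) (cols : Int) (out : List Int) : Decidable (Spec_diagonal_pattern rows cols out) := by unfold Spec_diagonal_pattern; infer_instance

-- ===== CLAIM (what is proved, stated in full; the proofs are below) =====
def Claim_equal_diagonal_pattern : Prop := ∀ (rows : Int) (cols : Int), Dom_diagonal_pattern rows cols → Spec_diagonal_pattern rows cols (diagonal_pattern rows cols)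

-- ===== LEMMAS AND PROOFS =====

-- filtering an increasing range by an interval predicate yields the intersected range
theorem filter_pyRange_interval (c d : Int) : ∀ (n : Nat) (a b : Int), (b - a).toNat = n →
    (PySem.List.pyRange a b 1).filter (fun i => decide (c ≤ i ∧ i < d)) =
      PySem.List.pyRange (max a c) (min b d) 1 := by
  intro n
  induction n with
  | zero =>
    intro a b h
    rw [PySem.List.pyRange_one_eq_nil (by omega),
      PySem.List.pyRange_one_eq_nil
        (le_trans (min_le_left b d) (le_trans (by omega) (le_max_left a c)))]
    simp
  | succ n ih =>
    intro a b h
    rw [PySem.List.pyRange_one_cons (by omega), List.filter_cons]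
    by_cases hp : c ≤ a ∧ a < d
    · rw [if_pos (by simpa using hp), ih (a + 1) b (by omega),
        max_eq_left (le_trans hp.1 (by omega)), max_eq_left hp.1,
        PySem.List.pyRange_one_cons (lt_min (by omega) hp.2)]
    · rw [if_neg (by simpa using hp), ih (a + 1) b (by omega)]
      by_cases hc : a < c
      · rw [max_eq_right (by omega), max_eq_right (by omega)]
      · have hda : d ≤ a := by omega
        rw [PySem.List.pyRange_one_eq_nil
            (le_trans (min_le_right b d) (le_trans (by omega) (le_max_left _ _))),
          PySem.List.pyRange_one_eq_nil
            (le_trans (min_le_right b d) (le_trans hda (le_max_left _ _)))]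

theorem flatMap_if_singleton (l : List Int) (p : Int → Bool) (f : Int → Int) :
    l.flatMap (fun i => if p i then [f i] else []) = (l.filter p).map f := by
  induction l with
  | nil => rfl
  | cons x xs ih =>
    rw [List.flatMap_cons, List.filter_cons, ih]
    by_cases hp : p x <;> simp [hp]

-- the bucket of diagonal s holds exactly A's unreversed diagonal s
theorem bucket_eq (rows cols s : Int) :
    (((PySem.List.pyRange 0 rows 1).foldl (fun b i =>
        (PySem.List.pyRange 0 cols 1).foldl (fun b j =>
          b.modify (i + j) [] (· ++ [i * cols + j])) b)
        (PySem.Dict.empty : PySem.Dict Int (List Int))).getD s []) =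
      (PySem.List.pyRange (max 0 (s - cols + 1)) (min rows (s + 1)) 1).map
        (fun i => i * cols + (s - i)) := by
  calc
    _ = (((PySem.List.pyRange 0 rows 1).flatMap
            (fun i => (PySem.List.pyRange 0 cols 1).map (fun j => (i + j, i * cols + j)))).foldl
          (fun b p => b.modify p.1 [] (· ++ [p.2]))
          (PySem.Dict.empty : PySem.Dict Int (List Int))).getD s [] := by
        rw [List.foldl_flatMap]
        congr 1
        refine PySem.List.foldl_congr_mem _ _ _ _ (fun b i _ => ?_)
        rw [List.foldl_map]
    _ = (((PySem.List.pyRange 0 rows 1).flatMap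
            (fun i => (PySem.List.pyRange 0 cols 1).map (fun j => (i + j, i * cols + j)))).filter
          (fun p => p.1 == s)).map (·.2) := by
        rw [PySem.Dict.getD_foldl_modify_append, PySem.Dict.getD_empty]; simp
    _ = _ := by
        rw [List.filter_flatMap, List.map_flatMap]
        have hper : ∀ i : Int,
            ((((PySem.List.pyRange 0 cols 1).map (fun j => (i + j, i * cols + j))).filter
              (fun p => p.1 == s)).map (·.2))
              = if decide (0 ≤ s - i ∧ s - i < cols) then [i * cols + (s - i)] else [] := by
          intro i
          rw [List.filter_map, List.map_map]
          have hpred : ((PySem.List.pyRange 0 cols 1).filter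
              ((fun p : Int × Int => p.1 == s) ∘ (fun j => (i + j, i * cols + j))))
              = (PySem.List.pyRange 0 cols 1).filter (fun j => decide (s - i ≤ j ∧ j < s - i + 1)) := by
            refine List.filter_congr (fun j _ => ?_)
            rw [Bool.eq_iff_iff]
            simp only [Function.comp_apply, beq_iff_eq, decide_eq_true_eq]
            omega
          rw [hpred, filter_pyRange_interval (s - i) (s - i + 1) (cols - 0).toNat 0 cols rfl]
          by_cases hc : 0 ≤ s - i ∧ s - i < cols
          · rw [max_eq_right hc.1, min_eq_right (by omega), PySem.List.pyRange_one_singleton,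
              if_pos (by simpa using hc)]
            simp [Function.comp]
          · have hle : min cols (s - i + 1) ≤ max 0 (s - i) := by
              rcases lt_or_ge (s - i) 0 with h1 | h1
              · exact le_trans (min_le_right _ _) (le_trans (by omega) (le_max_left _ _))
              · exact le_trans (min_le_left _ _) (le_trans (by omega) (le_max_right _ _))
            rw [PySem.List.pyRange_one_eq_nil hle, if_neg (by simpa using hc)]
            simp
        calc
          _ = (PySem.List.pyRange 0 rows 1).flatMap
                (fun i => if decide (0 ≤ s - i ∧ s - i < cols) then [i * cols + (s - i)] else []) :=
              List.flatMap_congr (fun i _ => hper i)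
          _ = ((PySem.List.pyRange 0 rows 1).filter
                (fun i => decide (0 ≤ s - i ∧ s - i < cols))).map (fun i => i * cols + (s - i)) :=
              flatMap_if_singleton _ _ _
          _ = _ := by
              have hpred : ((PySem.List.pyRange 0 rows 1).filter (fun i => decide (0 ≤ s - i ∧ s - i < cols)))
                  = (PySem.List.pyRange 0 rows 1).filter (fun i => decide (s - cols + 1 ≤ i ∧ i < s + 1)) := by
                refine List.filter_congr (fun i _ => ?_)
                rw [Bool.eq_iff_iff]
                simp only [decide_eq_true_eq]
                omega
              rw [hpred, filter_pyRange_interval (s - cols + 1) (s + 1) (rows - 0).toNat 0 rows rfl]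

-- A's inner loop builds exactly that same unreversed diagonal
theorem diagA_eq (rows cols s : Int) :
    ((PySem.List.pyRange (max 0 (s - cols + 1)) (min rows (s + 1)) 1).foldl
      (fun diagonal i =>
        if 0 ≤ s - i ∧ s - i < cols then diagonal ++ [i * cols + (s - i)] else diagonal)
      ([] : List Int)) =
      (PySem.List.pyRange (max 0 (s - cols + 1)) (min rows (s + 1)) 1).map
        (fun i => i * cols + (s - i)) := by
  rw [PySem.List.foldl_append_ite (fun i => 0 ≤ s - i ∧ s - i < cols) (fun i => i * cols + (s - i)),
    List.nil_append]
  congr 1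
  rw [List.filter_eq_self]
  intro i hi
  rw [PySem.List.mem_pyRange_one] at hi
  have h1 : s - cols + 1 ≤ i := le_trans (le_max_right _ _) hi.1
  have h2 : i < s + 1 := lt_of_lt_of_le hi.2 (min_le_right _ _)
  simp only [decide_eq_true_eq]
  omega

-- ===== VERDICT (by name: the statement is the Claim_ definition above) =====
theorem diagonal_pattern_spec : Claim_equal_diagonal_pattern := by
  intro rows cols _
  unfold Spec_diagonal_pattern diagonal_pattern diagonal_pattern_alt
  refine PySem.List.foldl_congr_mem _ _ _ _ (fun acc s _ => ?_)
  show acc ++ _ = acc ++ _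
  congr 1
  rw [bucket_eq rows cols s, diagA_eq rows cols s]
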